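-- pv_equiv track=rewrite | github.com/gregwienecke/web-caesar | caesar.py | alphabet_position
-- ===== SOURCE A (Python) =====
-- def alphabet_position(letter):
-- 	lc_alphabet = "abcdefghijklmnopqrstuvwxyz"
-- 	uc_alphabet = "ABCDEFGHIJKLMNOPQRSTUVWXYZ"
--
-- 	for i in range(len(lc_alphabet)):
-- 		if letter == lc_alphabet[i]:
-- 			return i
--
-- 	for i in range(len(uc_alphabet)):
-- 		if letter == uc_alphabet[i]:
-- 			return i
-- ===== SOURCE B (Python) =====
-- def alphabet_position(letter):
--     if isinstance(letter, str) and len(letter) == 1: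
--         if 'a' <= letter <= 'z':
--             return ord(letter) - ord('a')
--         if 'A' <= letter <= 'Z':
--             return ord(letter) - ord('A')
--     return None
-- ===== Notes on version B (the rewrite author's own statement) =====
-- stated objective: idiomatic
-- what changed: Replaces the two 26-step linear scans over alphabet strings with a constant-time arithmetic closed form using ord after a single-character range check.
import Mathlib
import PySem

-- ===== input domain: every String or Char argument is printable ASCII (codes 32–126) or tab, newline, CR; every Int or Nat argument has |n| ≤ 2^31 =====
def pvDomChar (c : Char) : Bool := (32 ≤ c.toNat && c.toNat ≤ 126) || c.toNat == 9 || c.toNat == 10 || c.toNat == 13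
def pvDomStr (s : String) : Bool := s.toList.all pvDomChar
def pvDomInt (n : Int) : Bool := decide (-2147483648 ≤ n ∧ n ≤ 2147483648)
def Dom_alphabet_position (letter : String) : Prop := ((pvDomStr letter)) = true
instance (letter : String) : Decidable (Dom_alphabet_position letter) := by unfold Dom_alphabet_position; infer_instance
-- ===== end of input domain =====

-- B replaces A's two 26-step linear scans with an O(1) arithmetic closed form on the character code (objective: idiomatic).

-- ===== PORT A =====
-- the indexed loop `for i in range(len(s)): if letter == s[i]: return i` as structural recursion carrying the index i
def pvScanA (letter : String) (alph : List Char) (i : Int) : Option Int :=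
  match alph with
  | [] => none
  | c :: rest => if letter = String.ofList [c] then some i else pvScanA letter rest (i + 1)

def alphabet_position (letter : String) : Option Int :=
  match pvScanA letter "abcdefghijklmnopqrstuvwxyz".toList 0 with
  | some i => some i
  | none => pvScanA letter "ABCDEFGHIJKLMNOPQRSTUVWXYZ".toList 0

-- ===== PORT B =====
-- single-character check, then ord arithmetic (ord(letter) - ord('a') / ord('A'))
def alphabet_position_alt (letter : String) : Option Int :=
  match letter.toList with
  | [c] =>
    if 'a' ≤ c ∧ c ≤ 'z' then some ((c.toNat : Int) - 97)
    else if 'A' ≤ c ∧ c ≤ 'Z' then some ((c.toNat : Int) - 65)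
    else none
  | _ => none

-- ===== PRECONDITION & SPEC =====
def Spec_alphabet_position (letter : String) (out : Option Int) : Prop := out = alphabet_position_alt letter
instance (letter : String) (out : Option Int) : Decidable (Spec_alphabet_position letter out) := by unfold Spec_alphabet_position; infer_instance

-- ===== CLAIM (what is proved, stated in full; the proofs are below) =====
def Claim_equal_alphabet_position : Prop := ∀ (letter : String), Dom_alphabet_position letter → Spec_alphabet_position letter (alphabet_position letter)

-- ===== LEMMAS AND PROOFS =====

theorem pv_eq_single_iff (s : String) (c : Char) : (s = String.ofList [c]) ↔ s.toList = [c] := by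
  constructor
  · intro h; simp [h]
  · intro h; rw [← s.ofList_toList, h]

theorem pv_char_eq_iff (a b : Char) : (a = b) ↔ a.toNat = b.toNat := by
  constructor
  · intro h; rw [h]
  · intro h; exact Char.ext (UInt32.toNat_inj.mp h)

theorem pv_char_le_iff (a b : Char) : (a ≤ b) ↔ a.toNat ≤ b.toNat := by
  constructor <;> intro h <;> exact h

theorem pvScanA_none_of_len (letter : String) (alph : List Char) (i : Int)
    (h : letter.toList.length ≠ 1) : pvScanA letter alph i = none := by
  induction alph generalizing i with
  | nil => rfl
  | cons c rest ih =>
    rw [pvScanA]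
    rw [if_neg, ih]
    intro hc
    exact h (by rw [(pv_eq_single_iff letter c).mp hc]; rfl)

-- scanning a list of consecutively-coded characters is an interval test
theorem pv_scan_consec (c : Char) (l : List Char) :
    ∀ (lo n : ℕ) (i : Int), l.map Char.toNat = List.range' lo n →
      pvScanA (String.ofList [c]) l i =
        if lo ≤ c.toNat ∧ c.toNat < lo + n then some (i + ((c.toNat : Int) - (lo : ℕ))) else none := by
  induction l with
  | nil =>
    intro lo n i h
    cases n with
    | zero => rw [if_neg (by omega)]; rfl
    | succ m => simp [List.range'_succ] at h
  | cons d rest ih =>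
    intro lo n i h
    cases n with
    | zero => simp [List.range'] at h
    | succ m =>
      rw [List.range'_succ, List.map_cons, List.cons.injEq] at h
      obtain ⟨hd, ht⟩ := h
      rw [pvScanA]
      by_cases hc : c.toNat = d.toNat
      · rw [if_pos ((pv_eq_single_iff _ _).mpr (by
          rw [String.toList_ofList, List.cons.injEq]
          exact ⟨(pv_char_eq_iff c d).mpr hc, rfl⟩))]
        rw [if_pos (by omega)]
        have : ((c.toNat : Int) - (lo : ℕ)) = 0 := by omega
        rw [this, add_zero]
      · rw [if_neg (fun heq => hc (by
          have := congrArg String.toList heq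
          rw [String.toList_ofList, String.toList_ofList, List.cons.injEq] at this
          rw [this.1]))]
        rw [ih (lo + 1) m (i + 1) ht]
        split_ifs <;> first | omega | (simp only [Option.some.injEq]; try omega)

theorem pv_lc_codes : "abcdefghijklmnopqrstuvwxyz".toList.map Char.toNat = List.range' 97 26 := by decide

theorem pv_uc_codes : "ABCDEFGHIJKLMNOPQRSTUVWXYZ".toList.map Char.toNat = List.range' 65 26 := by decide

theorem pv_main_single (c : Char) :
    alphabet_position (String.ofList [c]) = alphabet_position_alt (String.ofList [c]) := by
  rw [alphabet_position, pv_scan_consec c _ 97 26 0 pv_lc_codes,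
    pv_scan_consec c _ 65 26 0 pv_uc_codes]
  simp only [alphabet_position_alt, String.toList_ofList, pv_char_le_iff]
  have ha : ('a').toNat = 97 := rfl
  have hz : ('z').toNat = 122 := rfl
  have hA : ('A').toNat = 65 := rfl
  have hZ : ('Z').toNat = 90 := rfl
  rw [ha, hz, hA, hZ]
  split_ifs <;> first | rfl | omega | (simp only [Option.some.injEq]; try omega)

-- ===== VERDICT (by name: the statement is the Claim_ definition above) =====
theorem alphabet_position_spec : Claim_equal_alphabet_position := by
  intro letter _
  unfold Spec_alphabet_position
  match h : letter.toList with
  | [c] =>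
    have hl : letter = String.ofList [c] := (pv_eq_single_iff letter c).mpr h
    rw [hl, pv_main_single]
  | [] =>
    rw [alphabet_position_alt, h]
    rw [alphabet_position, pvScanA_none_of_len _ _ _ (by rw [h]; simp),
        pvScanA_none_of_len _ _ _ (by rw [h]; simp)]
  | c :: d :: rest =>
    rw [alphabet_position_alt, h]
    rw [alphabet_position, pvScanA_none_of_len _ _ _ (by rw [h]; simp),
        pvScanA_none_of_len _ _ _ (by rw [h]; simp)]
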